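-- pv_equiv track=rewrite | github.com/fkakd1205/algorithms | Programmers/Level2/할인행사/Solution.py | solution
-- ===== SOURCE A (Python) =====
-- from collections import Counter
--
-- def solution(want, number, discount):
--     answer = 0
--     st = 0
--     en = 10
--     while True:
--         prod = discount[st:en]
--         if en > len(discount): break
--         prod = Counter(prod)
--
--         sign_up = True
--         for product, num in zip(want, number):
--             if prod[product] < num:
--                 sign_up = False
--                 break
--         if sign_up:
--             answer += 1
--
--         st += 1
--         en += 1
--     return answer
-- ===== SOURCE B (Python) =====
-- def solution(want, number, discount):
--     W = len(discount) - 9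
--     if W <= 0:
--         return 0
--     ok = [True] * W
--     for p, n in zip(want, number):
--         c = discount[:10].count(p)
--         col = []
--         for i in range(W):
--             col.append(c >= n)
--             if i + 1 < W:
--                 c += (discount[i + 10] == p) - (discount[i] == p)
--         ok = [a and b for a, b in zip(ok, col)]
--         if True not in ok:
--             break
--     return sum(ok)
-- ===== Notes on version B (the rewrite author's own statement) =====
-- stated objective: alternative
-- what changed: B interchanges the loops: instead of rebuilding a Counter for every 10-day window and checking all wanted items per window, B iterates once per (product, need) pair maintaining a single sliding integer count across windows, AND-combining per-pair boolean columns and stopping early when no window can still qualify.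
import Mathlib
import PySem

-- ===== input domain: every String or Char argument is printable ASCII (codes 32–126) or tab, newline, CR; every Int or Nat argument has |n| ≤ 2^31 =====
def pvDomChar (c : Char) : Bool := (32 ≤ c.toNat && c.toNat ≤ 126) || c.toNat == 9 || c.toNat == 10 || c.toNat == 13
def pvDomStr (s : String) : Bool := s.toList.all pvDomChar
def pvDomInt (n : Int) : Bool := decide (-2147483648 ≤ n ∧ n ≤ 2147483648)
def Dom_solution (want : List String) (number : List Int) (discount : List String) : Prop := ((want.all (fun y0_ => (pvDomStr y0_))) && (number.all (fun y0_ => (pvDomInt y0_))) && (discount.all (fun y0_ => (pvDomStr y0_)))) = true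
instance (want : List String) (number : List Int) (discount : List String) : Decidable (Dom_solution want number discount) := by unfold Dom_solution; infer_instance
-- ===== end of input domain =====

-- B interchanges the loops: one sliding integer count per wanted pair instead of a Counter rebuilt per 10-day window.

-- ===== PORT A =====
-- 'for product, num in zip(want, number): if prod[product] < num: sign_up = False; break'
def solutionCheck : List (String × Int) → PySem.Dict String Int → Bool
  | [], _ => true
  | (p, n) :: rest, d => if d.getD p 0 < n then false else solutionCheck rest d

-- the 'while True' loop of A: st is the window start, en = st + 10; returns the answer accumulated from st on
def solutionLoop (pairs : List (String × Int)) (discount : List String) (st : Nat) : Int :=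
  let prod := PySem.List.slice discount (some (st : Int)) (some ((st : Int) + 10))
  if h : (st : Int) + 10 > (discount.length : Int) then 0
  else
    let cnt := PySem.Dict.counter prod
    (if solutionCheck pairs cnt then 1 else 0) + solutionLoop pairs discount (st + 1)
termination_by discount.length - st
decreasing_by omega

def solution (want : List String) (number : List Int) (discount : List String) : Int :=
  solutionLoop (want.zip number) discount 0

-- ===== PORT B =====
-- the inner 'for i in range(W)' loop of B: builds the per-pair column, sliding the count c
def solutionCol (discount : List String) (p : String) (n : Int) (c : Int) (i W : Nat) : List Bool :=
  if h : i < W then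
    decide (c ≥ n) ::
      solutionCol discount p n
        (if i + 1 < W then
          c + (if PySem.List.pyGetD discount ((i : Int) + 10) "" == p then 1 else 0)
            - (if PySem.List.pyGetD discount (i : Int) "" == p then 1 else 0)
         else c)
        (i + 1) W
  else []
termination_by W - i
decreasing_by omega

-- the 'for p, n in zip(want, number)' loop of B, with the 'if True not in ok: break' early exit
def solutionPairs (discount : List String) (W : Nat) : List (String × Int) → List Bool → List Bool
  | [], ok => ok
  | (p, n) :: tl, ok =>
      let c : Int := ((PySem.List.slice discount none (some 10)).count p : Int)
      let ok' := (ok.zip (solutionCol discount p n c 0 W)).map (fun ab => ab.1 && ab.2)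
      if ok'.contains true then solutionPairs discount W tl ok' else ok'

def solution_alt (want : List String) (number : List Int) (discount : List String) : Int :=
  let W : Int := (discount.length : Int) - 9
  if W ≤ 0 then 0
  else
    let Wn := W.toNat
    let ok' := solutionPairs discount Wn (want.zip number) (List.replicate Wn true)
    ok'.foldl (fun a b => a + (if b then 1 else 0)) 0

-- ===== PRECONDITION & SPEC =====
def Spec_solution (want : List String) (number : List Int) (discount : List String) (out : Int) : Prop := out = solution_alt want number discount
instance (want : List String) (number : List Int) (discount : List String) (out : Int) : Decidable (Spec_solution want number discount out) := by unfold Spec_solution; infer_instance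

-- ===== CLAIM (what is proved, stated in full; the proofs are below) =====
def Claim_equal_solution : Prop := ∀ (want : List String) (number : List Int) (discount : List String), Dom_solution want number discount → Spec_solution want number discount (solution want number discount)

-- ===== LEMMAS AND PROOFS =====

-- count of p in the 10-day window starting at i
def winCount (discount : List String) (i : Nat) (p : String) : Nat :=
  ((discount.drop i).take 10).count p

-- whether window i satisfies every wanted pair
def winGood (pairs : List (String × Int)) (discount : List String) (i : Nat) : Bool :=
  pairs.all (fun pn => decide (pn.2 ≤ (winCount discount i pn.1 : Int)))

theorem slice_win (discount : List String) (st : Nat) :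
    PySem.List.slice discount (some (st : Int)) (some ((st : Int) + 10)) = (discount.drop st).take 10 := by
  have : ((st : Int) + 10) = ((st + 10 : Nat) : Int) := by push_cast; ring
  rw [this, PySem.List.slice_natCast]; congr 1; omega

theorem solutionCheck_eq (pairs : List (String × Int)) (d : PySem.Dict String Int) :
    solutionCheck pairs d = pairs.all (fun pn => decide (pn.2 ≤ d.getD pn.1 0)) := by
  induction pairs with
  | nil => rfl
  | cons hd tl ih =>
      obtain ⟨p, n⟩ := hd
      simp [solutionCheck, ih, List.all_cons]
      by_cases h : d.getD p 0 < n <;> simp [h] <;> omega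

theorem solutionLoop_eq (pairs : List (String × Int)) (discount : List String) (st : Nat) :
    solutionLoop pairs discount st
      = ((List.range' st (discount.length - 9 - st)).countP (winGood pairs discount) : Int) := by
  fun_induction solutionLoop pairs discount st with
  | case1 st h =>
      have : discount.length - 9 - st = 0 := by omega
      simp [this]
  | case2 st prod h cnt ih =>
      have hn : discount.length - 9 - st = (discount.length - 9 - (st + 1)) + 1 := by omega
      rw [hn, List.range'_succ, List.countP_cons]
      have hcheck : solutionCheck pairs (PySem.Dict.counter (PySem.List.slice discount (some (st : Int)) (some ((st : Int) + 10)))) = winGood pairs discount st := by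
        rw [solutionCheck_eq]
        unfold winGood
        congr 1
        funext pn
        rw [PySem.Dict.getD_counter, slice_win]
        rfl
      show (if solutionCheck pairs (PySem.Dict.counter (PySem.List.slice discount (some (st : Int)) (some ((st : Int) + 10)))) = true then (1:Int) else 0) + solutionLoop pairs discount (st + 1) = _
      rw [ih, hcheck]
      by_cases hg : winGood pairs discount st = true <;> simp [hg] <;> push_cast <;> ring

-- sliding identity for the per-product window count
theorem winCount_slide (discount : List String) (i : Nat) (p : String) (h : i + 10 < discount.length) :
    winCount discount i p + (if discount[i + 10] = p then 1 else 0)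
      = (if discount[i] = p then 1 else 0) + winCount discount (i + 1) p := by
  unfold winCount
  have h1 : (discount.drop i).take 11 = (discount.drop i).take 10 ++ [discount[i + 10]] := by
    rw [List.take_add_one]
    congr 1
    rw [List.getElem?_drop]
    simp [List.getElem?_eq_getElem (by omega : i + 10 < discount.length)]
  have h2 : (discount.drop i).take 11 = discount[i] :: (discount.drop (i + 1)).take 10 := by
    rw [List.drop_eq_getElem_cons (by omega : i < discount.length)]
    rfl
  have := congrArg (List.count p) h1
  rw [h2] at this
  simp [List.count_append, List.count_cons] at this
  by_cases ha : discount[i + 10] = p <;> by_cases hb : discount[i] = p <;>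
    simp [ha, hb, eq_comm] at this ⊢ <;> omega

theorem solutionCol_nil (discount : List String) (p : String) (n c : Int) (i W : Nat) (h : ¬ i < W) :
    solutionCol discount p n c i W = [] := by
  unfold solutionCol
  simp [h]

theorem solutionCol_eq (discount : List String) (p : String) (n : Int) (hW : 10 ≤ discount.length) :
    ∀ (k i : Nat) (c : Int), k = discount.length - 9 - i → c = ((winCount discount i p : Nat) : Int) →
    solutionCol discount p n c i (discount.length - 9)
      = (List.range' i k).map (fun j => decide (n ≤ (winCount discount j p : Int))) := by
  intro k
  induction k with
  | zero =>
      intro i c hk _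
      rw [solutionCol_nil discount p n c i _ (by omega)]
      simp
  | succ k ih =>
      intro i c hk hc
      have hi : i < discount.length - 9 := by omega
      rw [List.range'_succ, List.map_cons]
      unfold solutionCol
      rw [dif_pos hi]
      rw [hc]
      congr 1
      · by_cases hnext : i + 1 < discount.length - 9
        · rw [if_pos hnext]
          have hrange : i + 10 < discount.length := by omega
          have e1 : PySem.List.pyGetD discount ((i : Int) + 10) "" = discount[i + 10] := by
            have : ((i : Int) + 10) = ((i + 10 : Nat) : Int) := by push_cast; ring
            rw [this, PySem.List.pyGetD_natCast]
            simp [List.getD, List.getElem?_eq_getElem hrange]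
          have e2 : PySem.List.pyGetD discount (i : Int) "" = discount[i] := by
            rw [PySem.List.pyGetD_natCast]
            simp [List.getD, List.getElem?_eq_getElem (by omega : i < discount.length)]
          have hslide := winCount_slide discount i p hrange
          apply ih
          · omega
          · rw [e1, e2]
            by_cases ha : discount[i + 10] = p <;> by_cases hb : discount[i] = p <;>
              simp [ha, hb] at hslide ⊢ <;> push_cast <;> omega
        · have hk0 : k = 0 := by omega
          rw [if_neg hnext, solutionCol_nil discount p n _ (i+1) _ (by omega), hk0]
          simp

theorem boolSum (l : List Bool) (a : Int) :
    l.foldl (fun a b => a + (if b then 1 else 0)) a = a + (l.countP id : Int) := by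
  induction l generalizing a with
  | nil => simp
  | cons b t ih => cases b <;> simp [ih] <;> push_cast <;> ring

theorem pairs_count (discount : List String) (hW : 10 ≤ discount.length) :
    ∀ (pairs : List (String × Int)) (f : Nat → Bool),
      (solutionPairs discount (discount.length - 9) pairs
          ((List.range' 0 (discount.length - 9)).map f)).countP id
        = (List.range' 0 (discount.length - 9)).countP (fun i => f i && winGood pairs discount i) := by
  intro pairs
  induction pairs with
  | nil =>
      intro f
      simp [solutionPairs, winGood, List.countP_map, Function.comp_def]
  | cons hd tl ih =>
      intro f
      obtain ⟨p, n⟩ := hd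
      have hc0 : ((List.count p (PySem.List.slice discount none (some 10)) : Nat) : Int)
          = ((winCount discount 0 p : Nat) : Int) := by
        have h10 : (10 : Int) = ((10 : Nat) : Int) := by norm_num
        rw [h10, PySem.List.slice_to_natCast]
        simp [winCount]
      have hcol : solutionCol discount p n ((List.count p (PySem.List.slice discount none (some 10)) : Nat) : Int) 0 (discount.length - 9)
          = (List.range' 0 (discount.length - 9)).map (fun j => decide (n ≤ (winCount discount j p : Int))) := by
        rw [hc0]
        exact solutionCol_eq discount p n hW (discount.length - 9) 0 _ (by omega) rfl
      have hstep : (((List.range' 0 (discount.length - 9)).map f).zip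
            (solutionCol discount p n ((List.count p (PySem.List.slice discount none (some 10)) : Nat) : Int) 0 (discount.length - 9))).map
            (fun ab => ab.1 && ab.2)
          = (List.range' 0 (discount.length - 9)).map (fun i => f i && decide (n ≤ (winCount discount i p : Int))) := by
        rw [hcol, List.zip_map', List.map_map]
        rfl
      have hgood : ∀ i, winGood ((p, n) :: tl) discount i
          = (decide (n ≤ (winCount discount i p : Int)) && winGood tl discount i) := by
        intro i
        simp [winGood, List.all_cons]
      show ((if _ then solutionPairs discount (discount.length - 9) tl _ else _).countP id) = _
      rw [hstep]
      by_cases hc : ((List.range' 0 (discount.length - 9)).map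
            (fun i => f i && decide (n ≤ (winCount discount i p : Int)))).contains true
      · rw [if_pos hc, ih (fun i => f i && decide (n ≤ (winCount discount i p : Int)))]
        apply List.countP_congr
        intro i _
        simp [hgood i, Bool.and_assoc]
      · rw [if_neg hc]
        simp only [List.contains_eq_mem, List.mem_map, decide_eq_true_eq] at hc
        push_neg at hc
        have hfalse : ∀ i ∈ List.range' 0 (discount.length - 9),
            (f i && decide (n ≤ (winCount discount i p : Int))) = false := by
          intro i hi
          have h3 := hc i hi
          cases hf : f i
          · simp [hf]
          · simp [hf] at h3 ⊢
            omega
        have hL : ((List.range' 0 (discount.length - 9)).map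
            (fun i => f i && decide (n ≤ (winCount discount i p : Int)))).countP id = 0 := by
          rw [List.countP_map]
          apply List.countP_eq_zero.mpr
          intro i hi
          simpa using hfalse i hi
        rw [hL]
        symm
        apply List.countP_eq_zero.mpr
        intro i hi
        have h2 := hfalse i hi
        rw [hgood i]
        cases hf : f i <;> cases hd : decide (n ≤ (winCount discount i p : Int)) <;>
          simp [hf, hd] at h2 ⊢

theorem solution_eq_count (want : List String) (number : List Int) (discount : List String) :
    solution want number discount
      = ((List.range' 0 (discount.length - 9)).countP (winGood (want.zip number) discount) : Int) := by
  unfold solution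
  rw [solutionLoop_eq]
  norm_num

theorem solution_alt_eq_count (want : List String) (number : List Int) (discount : List String) :
    solution_alt want number discount
      = ((List.range' 0 (discount.length - 9)).countP (winGood (want.zip number) discount) : Int) := by
  unfold solution_alt
  by_cases hlen : (discount.length : Int) - 9 ≤ 0
  · have h0 : discount.length - 9 = 0 := by omega
    simp [hlen, h0]
  · have hW : 10 ≤ discount.length := by omega
    have hWn : ((discount.length : Int) - 9).toNat = discount.length - 9 := by omega
    have hrep : List.replicate (((discount.length : Int) - 9).toNat) true
        = (List.range' 0 (discount.length - 9)).map (fun _ => true) := by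
      rw [List.map_const', List.length_range', hWn]
    simp only [if_neg hlen, hrep]
    simp only [hWn]
    rw [boolSum]
    rw [pairs_count discount hW (want.zip number) (fun _ => true)]
    rw [zero_add]
    have : (fun i => true && winGood (want.zip number) discount i) = winGood (want.zip number) discount := by
      funext i
      simp
    rw [this]

-- ===== VERDICT (by name: the statement is the Claim_ definition above) =====
theorem solution_spec : Claim_equal_solution := by
  intro want number discount _
  unfold Spec_solution
  rw [solution_eq_count, solution_alt_eq_count]
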